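-- pv_equiv track=rewrite | github.com/LPA-AI-Projects/LPA-AI-Projects-AI-Academic-Automations | app/services/pdf_service.py | _collect_section_lines
-- ===== SOURCE A (Python) =====
-- from typing import Iterable
--
-- def _collect_section_lines(lines: list[str], heading_keywords: Iterable[str]) -> list[str]:
--     """
--     Collect lines after a matching markdown heading until the next heading.
--     """
--     keywords = [k.lower() for k in heading_keywords]
--     active = False
--     collected: list[str] = []
--
--     for raw in lines:
--         line = raw.rstrip()
--         stripped = line.strip()
--         if not stripped:
--             if active:
--                 collected.append("")
--             continue
--
--         is_heading = stripped.startswith("#")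
--         if is_heading:
--             normalized_heading = stripped.lstrip("#").strip().lower()
--             if any(k in normalized_heading for k in keywords):
--                 active = True
--                 continue
--             if active:
--                 break
--             continue
--
--         if active:
--             collected.append(stripped)
--
--     return [line for line in collected if line.strip()]
-- ===== SOURCE B (Python) =====
-- def _collect_section_lines(lines, heading_keywords):
--     """Two-pass rewrite: split into (normalized heading, body) sections, then
--     concatenate the bodies of the leading run of matching sections."""
--     keywords = [k.lower() for k in heading_keywords]
--
--     # Pass 1: split lines into sections at every heading line.
--     sections = []
--     heading = None          # lines before the first heading belong to no heading
--     body = []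
--     for raw in lines:
--         s = raw.strip()
--         if s.startswith("#"):
--             sections.append((heading, body))
--             heading = s.lstrip("#").strip().lower()
--             body = []
--         else:
--             body.append(s)
--     sections.append((heading, body))
--
--     # Pass 2: emit bodies of matching sections; stop at the first
--     # non-matching heading after a match has been seen.
--     out = []
--     started = False
--     for heading, body in sections:
--         if heading is not None and any(k in heading for k in keywords):
--             started = True
--             out.extend(x for x in body if x)
--         elif started:
--             break
--     return out
-- ===== Notes on version B (the rewrite author's own statement) =====
-- stated objective: alternative
-- what changed: Replaces A's single-scan active/break state machine with a two-pass decomposition: first split the lines into (normalized-heading, body) sections, then concatenate the bodies of the leading run of keyword-matching sections.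
import Mathlib
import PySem

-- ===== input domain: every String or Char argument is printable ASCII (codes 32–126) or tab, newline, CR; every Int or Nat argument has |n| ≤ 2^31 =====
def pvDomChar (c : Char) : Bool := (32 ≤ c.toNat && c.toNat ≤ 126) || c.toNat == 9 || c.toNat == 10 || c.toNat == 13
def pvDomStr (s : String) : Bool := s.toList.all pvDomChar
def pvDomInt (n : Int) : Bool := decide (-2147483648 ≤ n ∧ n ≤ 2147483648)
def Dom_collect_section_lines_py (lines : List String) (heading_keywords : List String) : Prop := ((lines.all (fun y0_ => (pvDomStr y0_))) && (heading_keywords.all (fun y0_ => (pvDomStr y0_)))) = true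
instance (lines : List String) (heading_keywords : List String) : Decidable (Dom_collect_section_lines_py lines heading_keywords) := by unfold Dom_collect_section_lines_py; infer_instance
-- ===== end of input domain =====

-- B replaces A's single-scan active/break state machine by a two-pass decomposition
-- (split into sections, then concatenate the leading run of matching bodies); same cost, alternative structure.


-- hand port of Python's s.lstrip("#") (PySem has no left-only strip with a char set);
-- exact: drops exactly the leading '#' characters.
def pyLstripHash (s : String) : String := String.ofList (s.toList.dropWhile (fun c => c == '#'))

-- ===== PORT A =====
-- the for-loop of A: state = (active, collected); returning `collected` mid-list is Python's `break`
def collectA (keywords : List String) : List String → Bool → List String → List String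
  | [], _active, collected => collected
  | raw :: rest, active, collected =>
    let line := PySem.Str.rstrip raw
    let stripped := PySem.Str.strip line
    if stripped == "" then
      if active then collectA keywords rest active (collected ++ [""])
      else collectA keywords rest active collected
    else
      let is_heading := PySem.Str.startswith stripped "#"
      if is_heading then
        let normalized_heading := PySem.Str.lower (PySem.Str.strip (pyLstripHash stripped))
        if keywords.any (fun k => PySem.Str.isIn k normalized_heading) then
          collectA keywords rest true collected
        else if active then collected
        else collectA keywords rest active collected
      else
        if active then collectA keywords rest active (collected ++ [stripped])
        else collectA keywords rest active collected

def collect_section_lines_py (lines : List String) (heading_keywords : List String) : List String :=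
  let keywords := heading_keywords.map PySem.Str.lower
  (collectA keywords lines false []).filter (fun line => PySem.Str.strip line != "")

-- ===== PORT B =====
-- pass 1 of Source B: split into sections, state = (current heading, current body)
def splitSectionsB : List String → Option String → List String → List (Option String × List String)
  | [], heading, body => [(heading, body)]
  | raw :: rest, heading, body =>
    let s := PySem.Str.strip raw
    if PySem.Str.startswith s "#" then
      (heading, body) :: splitSectionsB rest (some (PySem.Str.lower (PySem.Str.strip (pyLstripHash s)))) []
    else
      splitSectionsB rest heading (body ++ [s])

-- Source B's loop condition `heading is not None and any(k in heading for k in keywords)`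
def secMatch (keywords : List String) : Option String → Bool
  | none => false
  | some h => keywords.any (fun k => PySem.Str.isIn k h)

-- pass 2 of Source B: returning [] with started = true mid-list is Python's `break`
def collectB (keywords : List String) : List (Option String × List String) → Bool → List String
  | [], _started => []
  | (heading, body) :: rest, started =>
    if secMatch keywords heading then
      body.filter (fun x => x != "") ++ collectB keywords rest true
    else if started then []
    else collectB keywords rest started

def collect_section_lines_py_alt (lines : List String) (heading_keywords : List String) : List String :=
  let keywords := heading_keywords.map PySem.Str.lower
  collectB keywords (splitSectionsB lines none []) false

-- ===== PRECONDITION & SPEC =====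
def Spec_collect_section_lines_py (lines : List String) (heading_keywords : List String) (out : List String) : Prop := out = collect_section_lines_py_alt lines heading_keywords
instance (lines : List String) (heading_keywords : List String) (out : List String) : Decidable (Spec_collect_section_lines_py lines heading_keywords out) := by unfold Spec_collect_section_lines_py; infer_instance

-- ===== CLAIM (what is proved, stated in full; the proofs are below) =====
def Claim_equal_collect_section_lines_py : Prop := ∀ (lines : List String) (heading_keywords : List String), Dom_collect_section_lines_py lines heading_keywords → Spec_collect_section_lines_py lines heading_keywords (collect_section_lines_py lines heading_keywords)

-- ===== LEMMAS AND PROOFS =====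

-- dropWhile is idempotent
theorem pv_dw_idem (p : Char → Bool) (l : List Char) :
    (l.dropWhile p).dropWhile p = l.dropWhile p := by
  rw [List.dropWhile_eq_self_iff]
  intro hl
  have hne : l.dropWhile p ≠ [] := by
    intro h
    rw [h] at hl
    simp at hl
  have := List.head_dropWhile_not p hne
  simpa [List.head_eq_getElem] using this

-- stripping from the left and from the right commute
theorem pv_ls_rs_comm (p : Char → Bool) (l : List Char) :
    ((l.dropWhile p).reverse.dropWhile p).reverse = ((l.reverse.dropWhile p).reverse).dropWhile p := by
  have hhead : ∀ (h : l.dropWhile p ≠ []), p ((l.dropWhile p).head h) = false :=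
    fun h => List.head_dropWhile_not p h
  have hl : l.takeWhile p ++ l.dropWhile p = l := List.takeWhile_append_dropWhile
  generalize ht : l.takeWhile p = t at *
  generalize hd : l.dropWhile p = d at *
  have htall : ∀ x ∈ t, p x = true := by
    intro x hx; rw [← ht] at hx; exact List.mem_takeWhile_imp hx
  by_cases hdnil : d = []
  · subst hdnil
    have h1 : l.reverse.dropWhile p = [] := by
      rw [List.dropWhile_eq_nil_iff]
      intro x hx
      exact htall x (by simpa [← hl] using List.mem_reverse.mp hx)
    simp [h1]
  · have hph : p (d.head hdnil) = false := hhead hdnil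
    have hdral : d.reverse.dropWhile p ≠ [] := by
      intro hN
      rw [List.dropWhile_eq_nil_iff] at hN
      have : p (d.head hdnil) = true := hN _ (List.mem_reverse.mpr (List.head_mem hdnil))
      simp [hph] at this
    have htr0 : t.reverse.dropWhile p = [] := by
      rw [List.dropWhile_eq_nil_iff]; intro x hx; exact htall x (List.mem_reverse.mp hx)
    have harr : l.reverse.dropWhile p = d.reverse.dropWhile p ++ t.reverse := by
      rw [← hl, List.reverse_append, List.dropWhile_append, htr0]
      simp [List.isEmpty_iff, hdral]
    have hpref : d = (d.reverse.dropWhile p).reverse ++ (d.reverse.takeWhile p).reverse := by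
      conv_lhs => rw [← List.reverse_reverse d, ← List.takeWhile_append_dropWhile (p := p) (l := d.reverse)]
      rw [List.reverse_append]
    have hpos' : 0 < d.length := by simpa [List.length_pos_iff] using hdnil
    have hph0 := hph
    rw [List.head_eq_getElem] at hph0
    have hfix : ((d.reverse.dropWhile p).reverse).dropWhile p = (d.reverse.dropWhile p).reverse := by
      rw [List.dropWhile_eq_self_iff]
      intro hpos
      have hEd : d[0]'hpos' = ((d.reverse.dropWhile p).reverse)[0] :=
        (List.getElem_of_eq hpref hpos').trans (List.getElem_append_left hpos)
      simp [← hEd, hph0]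
    have ht0 : t.dropWhile p = [] := by
      rw [List.dropWhile_eq_nil_iff]; exact htall
    rw [harr, List.reverse_append, List.reverse_reverse, List.dropWhile_append, ht0]
    simp [hfix]

theorem pv_chars_strip_rstrip (l : List Char) :
    PySem.Chars.strip (PySem.Chars.rstrip l) = PySem.Chars.strip l := by
  simp only [PySem.Chars.strip, PySem.Chars.lstrip, PySem.Chars.rstrip]
  rw [← pv_ls_rs_comm]
  simp [pv_dw_idem]
  exact (pv_ls_rs_comm _ _).symm

theorem pv_chars_strip_strip (l : List Char) :
    PySem.Chars.strip (PySem.Chars.strip l) = PySem.Chars.strip l := by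
  have h1 : PySem.Chars.strip (PySem.Chars.rstrip (PySem.Chars.lstrip l)) = PySem.Chars.strip (PySem.Chars.lstrip l) :=
    pv_chars_strip_rstrip (PySem.Chars.lstrip l)
  have h2 : PySem.Chars.strip (PySem.Chars.lstrip l) = PySem.Chars.strip l := by
    simp only [PySem.Chars.strip, PySem.Chars.lstrip, pv_dw_idem]
  exact h1.trans h2

theorem pv_strip_rstrip (s : String) :
    PySem.Str.strip (PySem.Str.rstrip s) = PySem.Str.strip s := by
  simp [PySem.Str.strip, pv_chars_strip_rstrip]

theorem pv_strip_strip (s : String) :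
    PySem.Str.strip (PySem.Str.strip s) = PySem.Str.strip s := by
  simp [PySem.Str.strip, pv_chars_strip_strip]

-- the filtered A-loop, as a function of the remaining lines and the active flag
def gA (keywords : List String) (ls : List String) (active : Bool) : List String :=
  (collectA keywords ls active []).filter (fun line => PySem.Str.strip line != "")

theorem collectA_acc (keywords : List String) (ls : List String) (active : Bool) (acc : List String) :
    collectA keywords ls active acc = acc ++ collectA keywords ls active [] := by
  induction ls generalizing active acc with
  | nil => simp [collectA]
  | cons raw rest ih =>
    simp only [collectA]
    split_ifs <;>
      first
        | exact ih _ _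
        | (rw [ih]; (conv_rhs => rw [ih]); simp)
        | simp


theorem gA_cons_blank (kw : List String) (raw : String) (rest : List String) (a : Bool)
    (hs : PySem.Str.strip raw = "") : gA kw (raw :: rest) a = gA kw rest a := by
  have h1 : PySem.Str.strip (PySem.Str.rstrip raw) = "" := by rw [pv_strip_rstrip, hs]
  have h0 : (PySem.Str.strip "" != "") = false := by decide
  cases a
  · simp only [gA, collectA, h1, beq_self_eq_true, if_true, Bool.false_eq_true, if_false]
  · simp only [gA, collectA, h1, beq_self_eq_true, if_true]
    rw [collectA_acc kw rest true ([] ++ [""])]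
    simp [h0]


theorem gA_cons_head (kw : List String) (raw : String) (rest : List String) (a : Bool)
    (hh : PySem.Str.startswith (PySem.Str.strip raw) "#" = true) :
    gA kw (raw :: rest) a =
      if kw.any (fun k => PySem.Str.isIn k (PySem.Str.lower (PySem.Str.strip (pyLstripHash (PySem.Str.strip raw))))) then gA kw rest true
      else if a then [] else gA kw rest a := by
  have hne : (PySem.Str.strip raw == "") = false := by
    rcases h : PySem.Str.strip raw == "" with _ | _
    · rfl
    · rw [(beq_iff_eq).mp h] at hh; exact absurd hh (by decide)
  have h1 : PySem.Str.strip (PySem.Str.rstrip raw) = PySem.Str.strip raw := pv_strip_rstrip raw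
  simp only [gA, collectA, h1, hne, Bool.false_eq_true, if_false, hh, if_true]
  split_ifs <;> simp [gA]


theorem gA_cons_body (kw : List String) (raw : String) (rest : List String) (a : Bool)
    (hs : PySem.Str.strip raw ≠ "") (hh : PySem.Str.startswith (PySem.Str.strip raw) "#" = false) :
    gA kw (raw :: rest) a = if a then PySem.Str.strip raw :: gA kw rest a else gA kw rest a := by
  have h1 : PySem.Str.strip (PySem.Str.rstrip raw) = PySem.Str.strip raw := pv_strip_rstrip raw
  have hne : (PySem.Str.strip raw == "") = false := beq_eq_false_iff_ne.mpr hs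
  have hkeep : (PySem.Str.strip (PySem.Str.strip raw) != "") = true := by
    rw [pv_strip_strip]; simpa using hs
  cases a
  · simp only [gA, collectA, h1, hne, Bool.false_eq_true, if_false, hh]
  · simp only [gA, collectA, h1, hne, Bool.false_eq_true, if_false, hh, if_true]
    rw [collectA_acc kw rest true ([] ++ [PySem.Str.strip raw])]
    simp [hkeep]


theorem pv_main (kw : List String) (ls : List String) (heading : Option String) (body : List String) (started : Bool) :
    collectB kw (splitSectionsB ls heading body) started =
      (if secMatch kw heading then body.filter (fun x => x != "") ++ gA kw ls true
       else if started then [] else gA kw ls false) := by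
  induction ls generalizing heading body started with
  | nil =>
    simp only [splitSectionsB, collectB, gA, collectA, List.filter_nil]
  | cons raw rest ih =>
    by_cases hh : PySem.Str.startswith (PySem.Str.strip raw) "#" = true
    · have hsome : ∀ h, secMatch kw (some h) = kw.any (fun k => PySem.Str.isIn k h) := fun _ => rfl
      simp only [splitSectionsB, hh, if_true, collectB, ih, hsome,
        gA_cons_head kw raw rest _ hh, List.filter_nil, List.nil_append]
      by_cases hm : secMatch kw heading = true <;>
        by_cases hst : started = true <;>
          by_cases hn : (kw.any fun k => PySem.Str.isIn k (PySem.Str.lower (PySem.Str.strip (pyLstripHash (PySem.Str.strip raw))))) = true <;>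
            simp [hm, hst, hn]
    · have hh' : PySem.Str.startswith (PySem.Str.strip raw) "#" = false := by simpa using hh
      by_cases hs : PySem.Str.strip raw = ""
      · have hsw : PySem.Str.startswith "" "#" = false := by decide
        simp only [splitSectionsB, hs, hsw, Bool.false_eq_true, if_false, ih,
          gA_cons_blank kw raw rest _ hs, List.filter_append]
        split_ifs <;> simp
      · simp only [splitSectionsB, hh', Bool.false_eq_true, if_false, ih,
          gA_cons_body kw raw rest _ hs hh', List.filter_append]
        have hkeep : (PySem.Str.strip raw != "") = true := by simpa using hs
        split_ifs <;> simp [List.filter, hkeep]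

-- ===== VERDICT (by name: the statement is the Claim_ definition above) =====
theorem collect_section_lines_py_spec : Claim_equal_collect_section_lines_py := by
  intro lines hk _
  unfold Spec_collect_section_lines_py collect_section_lines_py collect_section_lines_py_alt
  rw [pv_main]
  simp [secMatch, gA]
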